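-- pv_equiv track=rewrite | github.com/nelcode-lee/tech_stand_phase_2 | src/pipeline/generate_work_instruction.py | _build_ref_docs_context
-- ===== SOURCE A (Python) =====
-- def _build_ref_docs_context(ref_contents: list[str], limit_chars: int = 4000) -> str:
--     """Format reference document contents."""
--     parts = []
--     total = 0
--     for c in ref_contents:
--         if not c or not str(c).strip():
--             continue
--         block = str(c).strip()[:1500]
--         if total + len(block) > limit_chars:
--             break
--         parts.append(block)
--         total += len(block)
--     return "\n\n---\n\n".join(parts) if parts else ""
-- ===== SOURCE B (Python) =====
-- def _build_ref_docs_context(ref_contents: list[str], limit_chars: int = 4000) -> str: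
--     """Two-phase: build trimmed candidate blocks, compute running totals,
--     take the longest prefix whose running total stays <= limit_chars, join."""
--     blocks = [str(c).strip()[:1500] for c in ref_contents if c and str(c).strip()]
--     sums = []
--     t = 0
--     for b in blocks:
--         t += len(b)
--         sums.append(t)
--     k = 0
--     while k < len(sums) and sums[k] <= limit_chars:
--         k += 1
--     return "\n\n---\n\n".join(blocks[:k])
-- ===== Notes on version B (the rewrite author's own statement) =====
-- stated objective: alternative
-- what changed: Replaces A's single loop that accumulates a total and breaks mid-iteration with a two-phase pipeline: a comprehension builds all trimmed 1500-char candidate blocks, a prefix-sum list is computed, and the longest prefix with running total <= limit_chars is selected and joined.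
import Mathlib
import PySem

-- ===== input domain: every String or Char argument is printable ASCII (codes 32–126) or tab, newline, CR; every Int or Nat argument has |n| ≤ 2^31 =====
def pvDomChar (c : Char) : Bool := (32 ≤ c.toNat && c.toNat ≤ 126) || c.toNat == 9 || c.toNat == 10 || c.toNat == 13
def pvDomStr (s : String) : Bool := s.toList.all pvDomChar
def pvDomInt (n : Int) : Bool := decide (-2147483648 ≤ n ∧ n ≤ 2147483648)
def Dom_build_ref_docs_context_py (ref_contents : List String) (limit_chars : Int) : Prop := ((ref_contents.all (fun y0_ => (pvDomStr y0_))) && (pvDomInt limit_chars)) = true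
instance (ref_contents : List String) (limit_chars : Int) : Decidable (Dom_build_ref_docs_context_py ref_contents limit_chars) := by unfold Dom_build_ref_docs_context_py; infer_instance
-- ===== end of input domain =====

-- B is an alternative decomposition: blocks list + prefix sums + longest-prefix cutoff, instead of A's accumulate-and-break loop.

def pvSep : String := "\n\n---\n\n"

-- ===== PORT A =====
-- the for-loop of A with its `continue`/`break`, state = (parts, total)
def pvALoop (limit : Int) : List String → List String → Int → List String
  | [], parts, _total => parts
  | c :: rest, parts, total =>
    if PySem.Str.len c = 0 ∨ PySem.Str.len (PySem.Str.strip c) = 0 then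
      pvALoop limit rest parts total
    else
      let block := PySem.Str.slice (PySem.Str.strip c) none (some 1500)
      if limit < total + (PySem.Str.len block : Int) then parts
      else pvALoop limit rest (parts ++ [block]) (total + (PySem.Str.len block : Int))

def build_ref_docs_context_py (ref_contents : List String) (limit_chars : Int) : String :=
  let parts := pvALoop limit_chars ref_contents [] 0
  if parts.isEmpty then "" else PySem.Str.join pvSep parts

-- ===== PORT B =====
-- phase 1: the comprehension [str(c).strip()[:1500] for c in ref_contents if c and str(c).strip()]
def pvBBlocks (ref_contents : List String) : List String :=
  ref_contents.filterMap (fun c =>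
    if PySem.Str.len c ≠ 0 ∧ PySem.Str.len (PySem.Str.strip c) ≠ 0 then
      some (PySem.Str.slice (PySem.Str.strip c) none (some 1500))
    else none)

-- phase 2: running totals (the sums/t loop)
def pvBSums : List String → Int → List Int
  | [], _t => []
  | b :: rest, t => (t + (PySem.Str.len b : Int)) :: pvBSums rest (t + (PySem.Str.len b : Int))

-- phase 3: the while loop selecting the longest prefix with sums[k] <= limit
def pvBCount (limit : Int) : List Int → Nat
  | [] => 0
  | s :: rest => if s ≤ limit then 1 + pvBCount limit rest else 0

def build_ref_docs_context_py_alt (ref_contents : List String) (limit_chars : Int) : String :=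
  let blocks := pvBBlocks ref_contents
  let k := pvBCount limit_chars (pvBSums blocks 0)
  PySem.Str.join pvSep (blocks.take k)

-- ===== PRECONDITION & SPEC =====
def Spec_build_ref_docs_context_py (ref_contents : List String) (limit_chars : Int) (out : String) : Prop := out = build_ref_docs_context_py_alt ref_contents limit_chars
instance (ref_contents : List String) (limit_chars : Int) (out : String) : Decidable (Spec_build_ref_docs_context_py ref_contents limit_chars out) := by unfold Spec_build_ref_docs_context_py; infer_instance

-- ===== CLAIM (what is proved, stated in full; the proofs are below) =====
def Claim_equal_build_ref_docs_context_py : Prop := ∀ (ref_contents : List String) (limit_chars : Int), Dom_build_ref_docs_context_py ref_contents limit_chars → Spec_build_ref_docs_context_py ref_contents limit_chars (build_ref_docs_context_py ref_contents limit_chars)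

-- ===== LEMMAS AND PROOFS =====

-- A's loop produces exactly `parts ++` the longest affordable prefix of B's remaining blocks
theorem pvALoop_eq (limit : Int) (rc : List String) : ∀ (parts : List String) (total : Int),
    pvALoop limit rc parts total =
      parts ++ (pvBBlocks rc).take (pvBCount limit (pvBSums (pvBBlocks rc) total)) := by
  induction rc with
  | nil => intro parts total; simp only [pvALoop, pvBBlocks, List.filterMap_nil, pvBSums,
      pvBCount, List.take_nil, List.append_nil]
  | cons c rest ih =>
    intro parts total
    by_cases h : PySem.Str.len c = 0 ∨ PySem.Str.len (PySem.Str.strip c) = 0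
    · have hb : pvBBlocks (c :: rest) = pvBBlocks rest := by
        simp only [pvBBlocks, List.filterMap_cons]
        rw [if_neg (by tauto)]
      rw [hb]
      simp only [pvALoop]
      rw [if_pos h]
      exact ih parts total
    · have h' : PySem.Str.len c ≠ 0 ∧ PySem.Str.len (PySem.Str.strip c) ≠ 0 := not_or.mp h
      have hb : pvBBlocks (c :: rest) =
          PySem.Str.slice (PySem.Str.strip c) none (some 1500) :: pvBBlocks rest := by
        simp only [pvBBlocks, List.filterMap_cons]
        rw [if_pos h']
      set block := PySem.Str.slice (PySem.Str.strip c) none (some 1500) with hblock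
      rw [hb]
      simp only [pvALoop]
      rw [if_neg h]
      simp only [pvBSums, pvBCount]
      by_cases hl : limit < total + (PySem.Str.len block : Int)
      · rw [if_pos hl, if_neg (by omega : ¬ total + (PySem.Str.len block : Int) ≤ limit)]
        simp only [List.take_zero, List.append_nil]
      · rw [if_neg hl, if_pos (by omega : total + (PySem.Str.len block : Int) ≤ limit)]
        rw [ih (parts ++ [block]) (total + (PySem.Str.len block : Int))]
        simp only [Nat.add_comm 1, List.take_succ_cons, List.append_assoc, List.singleton_append]

theorem pv_join_nil : PySem.Str.join pvSep [] = "" := by decide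

-- ===== VERDICT (by name: the statement is the Claim_ definition above) =====
theorem build_ref_docs_context_py_spec : Claim_equal_build_ref_docs_context_py := by
  intro rc limit _
  unfold Spec_build_ref_docs_context_py build_ref_docs_context_py build_ref_docs_context_py_alt
  rw [pvALoop_eq limit rc [] 0]
  simp only [List.nil_append]
  by_cases h : ((pvBBlocks rc).take (pvBCount limit (pvBSums (pvBBlocks rc) 0))).isEmpty
  · rw [if_pos h]
    rw [List.isEmpty_iff] at h
    rw [h, pv_join_nil]
  · rw [if_neg h]
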